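-- pv_equiv track=rewrite | github.com/soundarzozm/codeforces | 1034/C.py | solve
-- ===== SOURCE A (Python) =====
-- def solve(n, nums):
--     ans = [0] * n
--     ans[0] = 1
--     ans[n-1] = 1
--
--     minV = nums[0]
--     maxV = nums[n-1]
--
--     for i in range(1, n-1):
--         if nums[i] < minV:
--             ans[i] = 1
--             minV = nums[i]
--
--     for i in range(n-2, 0, -1):
--         if nums[i] > maxV:
--             ans[i] = 1
--             maxV = nums[i]
--
--     return "".join(str(x) for x in ans)
-- ===== SOURCE B (Python) =====
-- def solve(n, nums):
--     if n == 1: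
--         return "1"
--     # pmins[k] = min(nums[0..k]); strict-left minimum of position i is pmins[i-1]
--     pmins = [nums[0]]
--     for i in range(1, n - 1):
--         pmins.append(min(pmins[-1], nums[i]))
--     # smaxs[d] = max(nums[n-1-d..n-1]); strict-right maximum of position i is smaxs[n-2-i]
--     smaxs = [nums[n - 1]]
--     for i in range(n - 2, 0, -1):
--         smaxs.append(max(smaxs[-1], nums[i]))
--     bits = ["1"]
--     for i in range(1, n - 1):
--         if nums[i] < pmins[i - 1] or nums[i] > smaxs[n - 2 - i]:
--             bits.append("1")
--         else:
--             bits.append("0")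
--     bits.append("1")
--     return "".join(bits)
-- ===== Notes on version B (the rewrite author's own statement) =====
-- stated objective: alternative
-- what changed: Instead of mutating a 0/1 marker array in place with two stateful scans (running min forward, running max backward), B precomputes explicit prefix-min and suffix-max tables by pure appends and then emits each output character in one final pass from a per-index formula.
import Mathlib
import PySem

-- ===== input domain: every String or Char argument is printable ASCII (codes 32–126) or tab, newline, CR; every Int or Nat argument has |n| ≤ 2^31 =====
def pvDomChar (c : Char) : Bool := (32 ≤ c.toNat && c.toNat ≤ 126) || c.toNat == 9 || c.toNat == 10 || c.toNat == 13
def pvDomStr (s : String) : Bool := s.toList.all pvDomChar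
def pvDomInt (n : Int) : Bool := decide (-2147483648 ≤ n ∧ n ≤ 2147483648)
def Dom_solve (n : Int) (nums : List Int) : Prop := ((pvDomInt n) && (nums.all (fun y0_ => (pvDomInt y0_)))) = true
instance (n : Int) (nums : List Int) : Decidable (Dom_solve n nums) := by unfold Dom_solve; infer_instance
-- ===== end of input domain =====

-- B replaces A's in-place 0/1 marker array (two stateful scans) by pure prefix-min / suffix-max
-- tables and one final per-index pass (objective: alternative decomposition, same cost).
-- Within Pre_ all list indices are nonnegative and in range, so List.set i.toNat / pyGetD are exact.

-- ===== PORT A =====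
def stepMin (nums : List Int) (st : List Int × Int) (i : Int) : List Int × Int :=
  if PySem.List.pyGetD nums i 0 < st.2 then (st.1.set i.toNat 1, PySem.List.pyGetD nums i 0) else st

def stepMax (nums : List Int) (st : List Int × Int) (i : Int) : List Int × Int :=
  if PySem.List.pyGetD nums i 0 > st.2 then (st.1.set i.toNat 1, PySem.List.pyGetD nums i 0) else st

def solve (n : Int) (nums : List Int) : String :=
  let ans := ((List.replicate n.toNat (0 : Int)).set 0 1).set (n - 1).toNat 1
  let p := (PySem.List.pyRange 1 (n - 1)).foldl (stepMin nums) (ans, PySem.List.pyGetD nums 0 0)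
  let q := (PySem.List.pyRange (n - 2) 0 (-1)).foldl (stepMax nums) (p.1, PySem.List.pyGetD nums (n - 1) 0)
  PySem.Str.join "" (q.1.map PySem.Int.toStr)

-- ===== PORT B =====
def stepPmin (nums : List Int) (acc : List Int) (i : Int) : List Int :=
  acc ++ [min (PySem.List.pyGetD acc (-1) 0) (PySem.List.pyGetD nums i 0)]

def stepSmax (nums : List Int) (acc : List Int) (i : Int) : List Int :=
  acc ++ [max (PySem.List.pyGetD acc (-1) 0) (PySem.List.pyGetD nums i 0)]

def stepBit (nums pmins smaxs : List Int) (n : Int) (acc : List String) (i : Int) : List String :=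
  if PySem.List.pyGetD nums i 0 < PySem.List.pyGetD pmins (i - 1) 0 ∨
      PySem.List.pyGetD nums i 0 > PySem.List.pyGetD smaxs (n - 2 - i) 0 then
    acc ++ ["1"]
  else
    acc ++ ["0"]

def solve_alt (n : Int) (nums : List Int) : String :=
  if n == 1 then "1"
  else
    let pmins := (PySem.List.pyRange 1 (n - 1)).foldl (stepPmin nums) [PySem.List.pyGetD nums 0 0]
    let smaxs := (PySem.List.pyRange (n - 2) 0 (-1)).foldl (stepSmax nums) [PySem.List.pyGetD nums (n - 1) 0]
    let bits := (PySem.List.pyRange 1 (n - 1)).foldl (stepBit nums pmins smaxs n) ["1"]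
    PySem.Str.join "" (bits ++ ["1"])

-- ===== PRECONDITION & SPEC =====
-- Pre_ excludes exactly the inputs where Python A raises an IndexError: n < 1 (ans[0] or
-- ans[n-1] on a too-short list) or n > len(nums) (nums[n-1] out of range).
def Pre_solve (n : Int) (nums : List Int) : Prop := 1 ≤ n ∧ n ≤ nums.length
instance (n : Int) (nums : List Int) : Decidable (Pre_solve n nums) := by unfold Pre_solve; infer_instance
def pvWitness_solve : Int × List Int := (2, [3, 1])

def Spec_solve (n : Int) (nums : List Int) (out : String) : Prop := out = solve_alt n nums
instance (n : Int) (nums : List Int) (out : String) : Decidable (Spec_solve n nums out) := by unfold Spec_solve; infer_instance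

-- ===== CLAIM (what is proved, stated in full; the proofs are below) =====
def Claim_equal_solve : Prop := ∀ (n : Int) (nums : List Int), Dom_solve n nums → Pre_solve n nums → Spec_solve n nums (solve n nums)

-- ===== LEMMAS AND PROOFS =====

-- prefix minimum: pmN nums k = min nums[0..k]
def pmN (nums : List Int) : Nat → Int
  | 0 => nums.getD 0 0
  | k + 1 => min (pmN nums k) (nums.getD (k + 1) 0)

-- suffix maximum by distance from the right end: smD nums m d = max nums[m-1-d..m-1]
def smD (nums : List Int) (m : Nat) : Nat → Int
  | 0 => nums.getD (m - 1) 0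
  | d + 1 => max (smD nums m d) (nums.getD (m - 2 - d) 0)

-- A's marker array after the forward loop has processed indices 1..k
def markA (nums : List Int) (m k : Nat) : List Int :=
  (List.range m).map (fun j => if j = 0 ∨ j = m - 1 then 1 else
    if 1 ≤ j ∧ j ≤ k ∧ nums.getD j 0 < pmN nums (j - 1) then 1 else 0)

-- A's marker array when the backward loop still has indices k..1 to process
def markAB (nums : List Int) (m k : Nat) : List Int :=
  (List.range m).map (fun j => if j = 0 ∨ j = m - 1 then 1 else
    if nums.getD j 0 < pmN nums (j - 1) ∨ (k + 1 ≤ j ∧ nums.getD j 0 > smD nums m (m - 2 - j)) then 1 else 0)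

lemma pyRange_neg_one_cons (k : Nat) :
    PySem.List.pyRange ((k : Int) + 1) 0 (-1) = ((k : Int) + 1) :: PySem.List.pyRange (k : Int) 0 (-1) := by
  simp only [PySem.List.pyRange]
  norm_num
  rw [show (if 0 < k then k else 0) = k by split_ifs <;> omega]
  rw [List.range_succ_eq_map, List.map_cons, List.map_map]
  congr 1
  · norm_num

lemma pyGetD_append_singleton_neg_one (l : List Int) (x d : Int) :
    PySem.List.pyGetD (l ++ [x]) (-1) d = x := by
  simp [PySem.List.pyGetD, PySem.List.pyGet?, PySem.List.pyIdx?]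

lemma map_range_set {α : Type} (m j : Nat) (f : Nat → α) (v : α) (hj : j < m) :
    ((List.range m).map f).set j v = (List.range m).map (fun i => if i = j then v else f i) := by
  apply List.ext_getElem
  · simp
  · intro i h1 h2
    simp at h1
    rw [List.getElem_set]
    by_cases hij : j = i <;> simp [hij, List.getElem_map, List.getElem_range]
    intro h; omega

lemma map_range_ext {α : Type} (m : Nat) (f g : Nat → α) (h : ∀ j, j < m → f j = g j) :
    (List.range m).map f = (List.range m).map g :=
  List.map_congr_left (fun j hj => h j (List.mem_range.mp hj))

lemma markA_zero (nums : List Int) (m : Nat) :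
    ((List.replicate m (0 : Int)).set 0 1).set (m - 1) 1 = markA nums m 0 := by
  apply List.ext_getElem
  · simp [markA]
  · intro i h1 h2
    simp [markA] at h2 ⊢
    rw [List.getElem_set, List.getElem_set]
    simp at h1
    by_cases hi0 : i = 0 <;> by_cases him : i = m - 1 <;>
      simp [hi0, him, List.getElem_replicate] <;> omega

lemma loop1 (nums : List Int) (m : Nat) :
    ∀ k, k ≤ m - 2 →
      (PySem.List.pyRange 1 (1 + (k : Int))).foldl (stepMin nums) (markA nums m 0, pmN nums 0)
        = (markA nums m k, pmN nums k) := by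
  intro k
  induction k with
  | zero => intro _; norm_num
  | succ k ih =>
    intro hk
    have hk' : k ≤ m - 2 := by omega
    rw [show (1 + ((k:Nat)+1 : Nat) : Int) = (1 + (k : Nat) : Int) + 1 by push_cast; ring]
    rw [PySem.List.pyRange_one_succ_right (by omega : (1:Int) ≤ 1 + (k:Nat))]
    rw [List.foldl_append, ih hk']
    show stepMin nums (markA nums m k, pmN nums k) (1 + (k:Nat)) = _
    rw [stepMin, show (1 + (k:Nat) : Int) = ((k+1 : Nat) : Int) by push_cast; ring]
    rw [PySem.List.pyGetD_natCast, Int.toNat_natCast]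
    by_cases h : nums.getD (k+1) 0 < pmN nums k
    · rw [if_pos h]
      simp only [Prod.mk.injEq]
      constructor
      · rw [markA, map_range_set _ (k+1) _ _ (by omega), markA]
        apply map_range_ext
        intro j _
        by_cases hj1 : j = k + 1
        · subst hj1
          simp only [Nat.add_sub_cancel]
          split_ifs <;> omega
        · split_ifs <;> omega
      · simp only [pmN]
        rw [min_eq_right (le_of_lt h)]
    · rw [if_neg h]
      simp only [Prod.mk.injEq]
      constructor
      · rw [markA, markA]
        apply map_range_ext
        intro j _
        by_cases hj1 : j = k + 1
        · subst hj1
          simp only [Nat.add_sub_cancel]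
          split_ifs <;> omega
        · split_ifs <;> omega
      · simp only [pmN]
        rw [min_eq_left (not_lt.mp h)]

lemma markA_eq_markAB (nums : List Int) (m : Nat) :
    markA nums m (m - 2) = markAB nums m (m - 2) := by
  rw [markA, markAB]
  apply map_range_ext
  intro j _
  split_ifs <;> omega

lemma loop2 (nums : List Int) (m : Nat) :
    ∀ k, k ≤ m - 2 →
      (PySem.List.pyRange (k : Int) 0 (-1)).foldl (stepMax nums) (markAB nums m k, smD nums m (m - 2 - k))
        = (markAB nums m 0, smD nums m (m - 2)) := by
  intro k
  induction k with
  | zero => intro _; norm_num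
  | succ k ih =>
    intro hk
    rw [show (((k:Nat)+1 : Nat) : Int) = (k : Int) + 1 by push_cast; ring]
    rw [pyRange_neg_one_cons k, List.foldl_cons]
    have hstep : stepMax nums (markAB nums m (k+1), smD nums m (m - 2 - (k+1))) ((k : Int) + 1)
        = (markAB nums m k, smD nums m (m - 2 - k)) := by
      rw [stepMax, show ((k:Int) + 1) = ((k+1 : Nat) : Int) by push_cast; ring]
      rw [PySem.List.pyGetD_natCast, Int.toNat_natCast]
      have e1 : m - 2 - k = (m - 2 - (k+1)) + 1 := by omega
      have e2 : m - 2 - (m - 2 - (k+1)) = k + 1 := by omega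
      by_cases h : nums.getD (k+1) 0 > smD nums m (m - 2 - (k+1))
      · rw [if_pos h]
        simp only [Prod.mk.injEq]
        constructor
        · rw [markAB, map_range_set _ (k+1) _ _ (by omega), markAB]
          apply map_range_ext
          intro j _
          by_cases hj1 : j = k + 1
          · subst hj1
            split_ifs <;> omega
          · split_ifs <;> omega
        · rw [e1]
          simp only [smD]
          rw [e2, max_eq_right (le_of_lt h)]
      · rw [if_neg h]
        simp only [Prod.mk.injEq]
        constructor
        · rw [markAB, markAB]
          apply map_range_ext
          intro j _
          by_cases hj1 : j = k + 1
          · subst hj1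
            split_ifs <;> omega
          · split_ifs <;> omega
        · rw [e1]
          simp only [smD]
          rw [e2, max_eq_left (not_lt.mp h)]
    rw [hstep, ih (by omega)]

lemma loopPmin (nums : List Int) (m : Nat) :
    ∀ k, k ≤ m - 2 →
      (PySem.List.pyRange 1 (1 + (k : Int))).foldl (stepPmin nums) [nums.getD 0 0]
        = (List.range (k + 1)).map (pmN nums) := by
  intro k
  induction k with
  | zero => intro _; norm_num; simp [pmN]
  | succ k ih =>
    intro hk
    rw [show (1 + ((k:Nat)+1 : Nat) : Int) = (1 + (k : Nat) : Int) + 1 by push_cast; ring]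
    rw [PySem.List.pyRange_one_succ_right (by omega : (1:Int) ≤ 1 + (k:Nat))]
    rw [List.foldl_append, ih (by omega)]
    show stepPmin nums _ _ = _
    rw [stepPmin, show (1 + (k:Nat) : Int) = ((k+1 : Nat) : Int) by push_cast; ring]
    rw [PySem.List.pyGetD_natCast]
    rw [List.range_succ, List.map_append, List.map_singleton, pyGetD_append_singleton_neg_one]
    rw [show List.range (k+1+1) = List.range (k+1) ++ [k+1] from List.range_succ]
    rw [List.map_append, List.range_succ, List.map_append, List.map_singleton, List.map_singleton]
    simp only [List.append_assoc, List.singleton_append]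
    rfl

lemma loopSmax (nums : List Int) (m : Nat) :
    ∀ i, i ≤ m - 2 →
      (PySem.List.pyRange (i : Int) 0 (-1)).foldl (stepSmax nums) ((List.range (m - 1 - i)).map (smD nums m))
        = (List.range (m - 1)).map (smD nums m) := by
  intro i
  induction i with
  | zero => intro _; norm_num
  | succ i ih =>
    intro hi
    rw [show (((i:Nat)+1 : Nat) : Int) = (i : Int) + 1 by push_cast; ring]
    rw [pyRange_neg_one_cons i, List.foldl_cons]
    have hstep : stepSmax nums ((List.range (m - 1 - (i+1))).map (smD nums m)) ((i : Int) + 1)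
        = (List.range (m - 1 - i)).map (smD nums m) := by
      rw [stepSmax, show ((i:Int) + 1) = ((i+1 : Nat) : Int) by push_cast; ring]
      rw [PySem.List.pyGetD_natCast]
      have e1 : m - 1 - (i+1) = (m - 3 - i) + 1 := by omega
      have e2 : m - 2 - (m - 3 - i) = i + 1 := by omega
      have e3 : m - 1 - i = (m - 3 - i) + 1 + 1 := by omega
      rw [e1, List.range_succ, List.map_append, List.map_singleton, pyGetD_append_singleton_neg_one]
      rw [e3, List.range_succ, List.map_append, List.map_singleton]
      rw [List.range_succ, List.map_append, List.map_singleton]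
      congr 2
      show _ = smD nums m ((m - 3 - i) + 1)
      simp only [smD]
      rw [e2]
    rw [hstep, ih (by omega)]

lemma loopBits (nums : List Int) (m : Nat) (hm : 2 ≤ m) :
    ∀ k, k ≤ m - 2 →
      (PySem.List.pyRange 1 (1 + (k : Int))).foldl
          (stepBit nums ((List.range (m - 1)).map (pmN nums)) ((List.range (m - 1)).map (smD nums m)) (m : Int)) ["1"]
        = "1" :: (List.range k).map (fun t =>
            if nums.getD (t + 1) 0 < pmN nums t ∨ nums.getD (t + 1) 0 > smD nums m (m - 2 - (t + 1)) then "1" else "0") := by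
  intro k
  induction k with
  | zero => intro _; norm_num
  | succ k ih =>
    intro hk
    rw [show (1 + ((k:Nat)+1 : Nat) : Int) = (1 + (k : Nat) : Int) + 1 by push_cast; ring]
    rw [PySem.List.pyRange_one_succ_right (by omega : (1:Int) ≤ 1 + (k:Nat))]
    rw [List.foldl_append, ih (by omega)]
    show stepBit _ _ _ _ _ _ = _
    rw [stepBit]
    rw [show (1 + (k:Nat) : Int) = ((k+1 : Nat) : Int) by push_cast; ring]
    rw [show (((k+1 : Nat) : Int) - 1) = ((k : Nat) : Int) by push_cast; ring]
    rw [show ((m : Int) - 2 - ((k+1 : Nat) : Int)) = ((m - 2 - (k+1) : Nat) : Int) by omega]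
    rw [PySem.List.pyGetD_natCast, PySem.List.pyGetD_natCast, PySem.List.pyGetD_natCast]
    rw [PySem.List.getD_map_range _ _ _ _ (by omega), PySem.List.getD_map_range _ _ _ _ (by omega)]
    rw [List.range_succ, List.map_append, List.map_singleton]
    split_ifs with hc <;> simp

lemma final_lists (nums : List Int) (m : Nat) (hm : 2 ≤ m) :
    (markAB nums m 0).map PySem.Int.toStr
      = ("1" :: (List.range (m - 2)).map (fun t =>
          if nums.getD (t + 1) 0 < pmN nums t ∨ nums.getD (t + 1) 0 > smD nums m (m - 2 - (t + 1)) then "1" else "0")) ++ ["1"] := by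
  rw [markAB]
  rw [show m = (m - 2) + 1 + 1 by omega]
  rw [List.range_succ, List.map_append, List.map_append, List.range_succ_eq_map]
  rw [List.map_cons, List.map_cons, List.map_map, List.map_map]
  simp only [Nat.add_sub_cancel]
  congr 1
  congr 1
  · norm_num
    rfl
  · apply map_range_ext
    intro t ht
    simp only [Function.comp_apply, Nat.succ_eq_add_one]
    rw [if_neg (by omega : ¬(t + 1 = 0 ∨ t + 1 = m - 2 + 1))]
    simp only [Nat.add_sub_cancel]
    split_ifs with h1 h2 <;> first | rfl | (exfalso; omega)
  · simp only [List.map_singleton]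
    rw [if_pos (Or.inr trivial)]
    rfl

-- ===== VERDICT (by name: the statement is the Claim_ definition above) =====
theorem solve_spec : Claim_equal_solve := by
  intro n nums _ hpre
  unfold Spec_solve
  obtain ⟨h1, h2⟩ := hpre
  obtain ⟨m, rfl⟩ : ∃ m : Nat, n = (m : Int) := ⟨n.toNat, by omega⟩
  have hlen : m ≤ nums.length := by exact_mod_cast h2
  by_cases hm : m = 1
  · subst hm
    have e1 : PySem.List.pyRange 1 ((1:Int) - 1) = [] := rfl
    have e2 : PySem.List.pyRange ((1:Int) - 2) 0 (-1) = [] := rfl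
    norm_num [solve, solve_alt, e1, e2]
    rfl
  · have hm2 : 2 ≤ m := by omega
    have e00 : PySem.List.pyGetD nums 0 0 = pmN nums 0 := by
      rw [PySem.List.pyGetD_of_nonneg nums 0 le_rfl, Int.toNat_zero]; rfl
    have eLget : PySem.List.pyGetD nums ((m:Int) - 1) 0 = nums.getD (m - 1) 0 := by
      rw [PySem.List.pyGetD_of_nonneg nums 0 (by omega : (0:Int) ≤ (m:Int) - 1)]
      rw [show ((m:Int) - 1).toNat = m - 1 by omega]
    have eR1 : (m:Int) - 1 = 1 + ((m - 2 : Nat) : Int) := by omega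
    have eR2 : (m:Int) - 2 = ((m - 2 : Nat) : Int) := by omega
    have hA : solve (m:Int) nums = PySem.Str.join "" ((markAB nums m 0).map PySem.Int.toStr) := by
      simp only [solve, Int.toNat_natCast]
      rw [show ((m:Int) - 1).toNat = m - 1 by omega]
      rw [markA_zero nums m, e00]
      rw [show PySem.List.pyGetD nums ((m:Int) - 1) 0 = smD nums m (m - 2 - (m - 2)) by
        rw [eLget, Nat.sub_self]; rfl]
      rw [eR1, loop1 nums m (m - 2) le_rfl]
      rw [show (markA nums m (m - 2), pmN nums (m - 2)).1 = markAB nums m (m - 2) by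
        rw [markA_eq_markAB]]
      rw [eR2, loop2 nums m (m - 2) le_rfl]
    have hB : solve_alt (m:Int) nums = PySem.Str.join ""
        (("1" :: (List.range (m - 2)).map (fun t =>
          if nums.getD (t + 1) 0 < pmN nums t ∨ nums.getD (t + 1) 0 > smD nums m (m - 2 - (t + 1))
          then "1" else "0")) ++ ["1"]) := by
      simp only [solve_alt]
      rw [if_neg (by simp only [beq_iff_eq]; omega : ¬ (((m:Int) == 1) = true))]
      rw [e00, eLget, eR1, eR2]
      rw [show [pmN nums 0] = [nums.getD 0 0] from rfl]
      rw [loopPmin nums m (m - 2) le_rfl]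
      rw [show m - 2 + 1 = m - 1 by omega]
      rw [show [nums.getD (m - 1) 0] = (List.range (m - 1 - (m - 2))).map (smD nums m) by
        rw [show m - 1 - (m - 2) = 1 by omega, List.range_one, List.map_singleton]; rfl]
      rw [loopSmax nums m (m - 2) le_rfl]
      rw [loopBits nums m hm2 (m - 2) le_rfl]
    rw [hA, hB, final_lists nums m hm2]
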